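-- pv_equiv track=rewrite | github.com/Makhafagy/my-job-journey | compare_applied.py | detect_applied_key
-- ===== SOURCE A (Python) =====
-- from typing import Set, Dict, List, Optional
--
-- def detect_applied_key(fieldnames: List[str]) -> Optional[str]:
--     """Return the header that looks like an 'Applied' flag column (if any)."""
--     if not fieldnames:
--         return None
--     for h in fieldnames:
--         hn = (h or "").strip().lower()
--         if hn in ("applied", "applied?"):
--             return h
--     for h in fieldnames:
--         hn = (h or "").strip().lower()
--         if "appl" in hn and ("date" not in hn):  # prefer plain Applied over "Date Applied"
--             return h
--     return None
-- ===== SOURCE B (Python) =====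
-- from typing import List, Optional
--
-- def detect_applied_key(fieldnames: List[str]) -> Optional[str]:
--     """Return the header that looks like an 'Applied' flag column (if any)."""
--     fallback = None
--     for h in (fieldnames or ()):
--         hn = (h or "").strip().lower()
--         if hn in ("applied", "applied?"):
--             return h
--         if fallback is None and "appl" in hn and "date" not in hn:
--             fallback = h
--     return fallback
-- ===== Notes on version B (the rewrite author's own statement) =====
-- stated objective: simpler
-- what changed: Replaces A's two sequential scans over fieldnames with a single pass that returns immediately on an exact 'applied'/'applied?' match and otherwise remembers the first 'appl'-but-not-'date' header in a fallback variable returned at the end.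
import Mathlib
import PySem

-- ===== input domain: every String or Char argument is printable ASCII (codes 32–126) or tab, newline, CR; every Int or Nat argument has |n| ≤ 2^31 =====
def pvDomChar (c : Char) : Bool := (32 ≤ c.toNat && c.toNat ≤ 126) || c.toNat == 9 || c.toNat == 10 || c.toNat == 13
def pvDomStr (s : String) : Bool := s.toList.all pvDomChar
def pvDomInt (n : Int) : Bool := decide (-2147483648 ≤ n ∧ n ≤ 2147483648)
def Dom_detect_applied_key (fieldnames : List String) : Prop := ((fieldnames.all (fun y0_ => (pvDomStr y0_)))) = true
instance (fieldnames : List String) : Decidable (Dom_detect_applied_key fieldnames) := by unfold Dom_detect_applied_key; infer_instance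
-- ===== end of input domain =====

-- B replaces A's two sequential scans with one pass keeping a fallback variable (objective: simpler).

-- ===== PORT A =====
-- normalized header: (h or "").strip().lower() — for a str, 'h or ""' is h itself
def pvNorm (h : String) : String := PySem.Str.lower (PySem.Str.strip h)

-- first loop of A: exact match on "applied"/"applied?"
def pvLoop1 : List String → Option String
  | [] => none
  | h :: t =>
    let hn := pvNorm h
    if hn == "applied" || hn == "applied?" then some h else pvLoop1 t

-- second loop of A: "appl" in hn and "date" not in hn
def pvLoop2 : List String → Option String
  | [] => none
  | h :: t =>
    let hn := pvNorm h
    if PySem.Str.isIn "appl" hn && !PySem.Str.isIn "date" hn then some h else pvLoop2 t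

def detect_applied_key (fieldnames : List String) : Option String :=
  if fieldnames = [] then none
  else
    match pvLoop1 fieldnames with
    | some r => some r
    | none => pvLoop2 fieldnames

-- ===== PORT B =====
-- single pass with a fallback accumulator
def pvLoopB : List String → Option String → Option String
  | [], fb => fb
  | h :: t, fb =>
    let hn := pvNorm h
    if hn == "applied" || hn == "applied?" then some h
    else
      pvLoopB t
        (if fb.isNone && (PySem.Str.isIn "appl" hn && !PySem.Str.isIn "date" hn) then some h else fb)

def detect_applied_key_alt (fieldnames : List String) : Option String :=
  pvLoopB fieldnames none

-- ===== PRECONDITION & SPEC =====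
def Spec_detect_applied_key (fieldnames : List String) (out : Option String) : Prop := out = detect_applied_key_alt fieldnames
instance (fieldnames : List String) (out : Option String) : Decidable (Spec_detect_applied_key fieldnames out) := by unfold Spec_detect_applied_key; infer_instance

-- ===== CLAIM (what is proved, stated in full; the proofs are below) =====
def Claim_equal_detect_applied_key : Prop := ∀ (fieldnames : List String), Dom_detect_applied_key fieldnames → Spec_detect_applied_key fieldnames (detect_applied_key fieldnames)

-- ===== LEMMAS AND PROOFS =====

theorem pvLoopB_eq (fs : List String) (fb : Option String) :
    pvLoopB fs fb =
      match pvLoop1 fs with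
      | some r => some r
      | none => match fb with
        | some f => some f
        | none => pvLoop2 fs := by
  induction fs generalizing fb with
  | nil => cases fb <;> rfl
  | cons h t ih =>
    unfold pvLoopB pvLoop1 pvLoop2
    by_cases hex : (pvNorm h == "applied" || pvNorm h == "applied?") = true
    · simp only [if_pos hex]
    · simp only [if_neg hex]
      rw [ih]
      cases h1 : pvLoop1 t with
      | some r =>
        cases fb <;>
          · split
            · rfl
            · rename_i heq; cases heq
      | none =>
        cases fb with
        | some f =>
          simp only [Option.isNone_some, Bool.false_and, Bool.false_eq_true, if_false]
        | none =>
          by_cases hc : (PySem.Str.isIn "appl" (pvNorm h) && !PySem.Str.isIn "date" (pvNorm h)) = true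
          · simp only [Option.isNone_none, Bool.true_and, if_pos hc]
          · simp only [Option.isNone_none, Bool.true_and, if_neg hc]

theorem detect_applied_key_spec : Claim_equal_detect_applied_key := by
  intro fs _
  show detect_applied_key fs = detect_applied_key_alt fs
  unfold detect_applied_key detect_applied_key_alt
  rw [pvLoopB_eq]
  cases fs with
  | nil => simp [pvLoop1, pvLoop2]
  | cons h t => simp
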